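-- pv_equiv track=rewrite | github.com/rrkas/dsa-practice-2026 | platforms/hacker-earth/M--count-valid-pairs-2-da02a8f2/solutions/solution.py | solve
-- ===== SOURCE A (Python) =====
-- from collections import Counter
--
-- def numsum(n):
--     s = 0
--     while n > 0:
--         s += n % 10
--         n //= 10
--     return s
--
-- def solve(n, nums):
--     count = Counter()
--
--     for e in nums:
--         count[numsum(e)] += 1
--
--     res = 0
--     for v in count.values():
--         res += v * (v - 1) // 2
--     return res
-- ===== SOURCE B (Python) =====
-- def numsum(n):
--     s = 0
--     while n > 0:
--         s += n % 10
--         n //= 10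
--     return s
--
-- def solve(n, nums):
--     seen = {}
--     res = 0
--     for e in nums:
--         ds = numsum(e)
--         res += seen.get(ds, 0)
--         seen[ds] = seen.get(ds, 0) + 1
--     return res
-- ===== Notes on version B (the rewrite author's own statement) =====
-- stated objective: simpler
-- what changed: B replaces A's two-phase approach (tally digit-sum frequencies into a Counter, then sum v*(v-1)//2 over the counts) with a single pass that, for each element, adds the number of previously seen elements with the same digit sum and then bumps that count, eliminating the second loop and the closed-form combination formula.
import Mathlib
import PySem

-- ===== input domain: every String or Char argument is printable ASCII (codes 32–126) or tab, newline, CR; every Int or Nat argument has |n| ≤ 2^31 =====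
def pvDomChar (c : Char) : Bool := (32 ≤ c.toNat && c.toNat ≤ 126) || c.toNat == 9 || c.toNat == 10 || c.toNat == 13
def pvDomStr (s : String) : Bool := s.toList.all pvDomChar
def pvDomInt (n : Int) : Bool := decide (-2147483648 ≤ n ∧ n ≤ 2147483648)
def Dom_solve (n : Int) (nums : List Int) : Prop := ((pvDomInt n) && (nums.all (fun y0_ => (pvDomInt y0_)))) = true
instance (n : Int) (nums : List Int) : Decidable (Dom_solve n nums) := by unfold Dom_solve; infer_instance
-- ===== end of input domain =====

-- B replaces A's two-phase "tally all digit sums, then sum v*(v-1)//2 over the counts" by a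
-- single pass that adds, for each element, the number of earlier elements with the same digit
-- sum (objective: simpler — one loop, no closed-form combination step).

-- ===== PORT A =====
-- shared helper: Python `numsum` (identical in Source A and Source B); the while-loop as accumulator
-- recursion on a fuel bound (n.toNat bounds the iteration count; fuel only makes it structural)
def numsumGo (fuel : Nat) (s : Int) (n : Int) : Int :=
  match fuel with
  | 0 => s
  | f + 1 => if 0 < n then numsumGo f (s + PySem.Int.mod n 10) (PySem.Int.floordiv n 10) else s

def numsum (n : Int) : Int := numsumGo n.toNat 0 n

def solve (n : Int) (nums : List Int) : Int :=
  let count := nums.foldl (fun d e => d.modify (numsum e) 0 (· + 1)) PySem.Dict.empty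
  count.values.foldl (fun res v => res + PySem.Int.floordiv (v * (v - 1)) 2) 0

-- ===== PORT B =====
def solve_alt (n : Int) (nums : List Int) : Int :=
  (nums.foldl (fun st e =>
      let ds := numsum e
      (st.1.insert ds (st.1.getD ds 0 + 1), st.2 + st.1.getD ds 0))
    (PySem.Dict.empty, 0)).2

-- ===== PRECONDITION & SPEC =====
def Spec_solve (n : Int) (nums : List Int) (out : Int) : Prop := out = solve_alt n nums
instance (n : Int) (nums : List Int) (out : Int) : Decidable (Spec_solve n nums out) := by unfold Spec_solve; infer_instance

-- ===== CLAIM (what is proved, stated in full; the proofs are below) =====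
def Claim_equal_solve : Prop := ∀ (n : Int) (nums : List Int), Dom_solve n nums → Spec_solve n nums (solve n nums)

-- ===== LEMMAS AND PROOFS =====

-- the pair count C(v,2) as A computes it
def pairsC (v : Int) : Int := PySem.Int.floordiv (v * (v - 1)) 2

lemma pairsC_succ (v : Int) : pairsC (v + 1) = pairsC v + v := by
  unfold pairsC
  rw [PySem.Int.floordiv_eq_ediv_of_pos (by norm_num), PySem.Int.floordiv_eq_ediv_of_pos (by norm_num)]
  have h : (v + 1) * (v + 1 - 1) = v * (v - 1) + v * 2 := by ring
  rw [h, Int.add_mul_ediv_right _ _ (by norm_num)]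

-- bumping the one entry with key x in an items list raises the pairsC-sum by its old value
lemma sum_pairsC_bump (its : List (Int × Int)) (x v : Int)
    (h : (x, v) ∈ its) (hnd : (its.map Prod.fst).Nodup) :
    ((its.map (fun p => if p.1 == x then (x, v + 1) else p)).map (fun p => pairsC p.2)).sum
      = (its.map (fun p => pairsC p.2)).sum + v := by
  induction its with
  | nil => simp at h
  | cons hd tl ih =>
    simp only [List.map_cons, List.nodup_cons] at hnd
    rcases List.mem_cons.mp h with heq | htl
    · subst heq
      have htlid : tl.map (fun p => if p.1 == x then (x, v + 1) else p) = tl := by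
        have hcong : ∀ p ∈ tl, (if p.1 == x then (x, v + 1) else p) = id p := by
          intro p hp
          have hpx : p.1 ≠ x := by
            intro hpx
            have hx : p.1 ∈ tl.map Prod.fst := List.mem_map_of_mem (f := Prod.fst) hp
            rw [hpx] at hx
            exact hnd.1 hx
          simp [hpx]
        rw [List.map_congr_left hcong, List.map_id]
      simp only [List.map_cons, beq_self_eq_true, if_pos, List.sum_cons, htlid]
      simp [pairsC_succ]
      omega
    · have hne : hd.1 ≠ x := by
        intro hdx
        have hx : (x, v).1 ∈ tl.map Prod.fst := List.mem_map_of_mem (f := Prod.fst) htl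
        rw [← hdx] at hx
        exact hnd.1 hx
      simp only [List.map_cons, List.sum_cons]
      rw [if_neg (show ¬((hd.1 == x) = true) by simp [hne]), ih htl hnd.2]
      omega

lemma pairsC_one : pairsC 1 = 0 := by decide

lemma asum_insert (d : PySem.Dict Int Int) (x : Int) (hnd : d.keys.Nodup) :
    (((d.insert x (d.getD x 0 + 1)).values).map pairsC).sum
      = ((d.values).map pairsC).sum + d.getD x 0 := by
  by_cases hc : d.contains x = true
  · have hxk : x ∈ d.keys := (PySem.Dict.contains_iff_mem_keys d x).mp hc
    have hex : ∃ p ∈ d.items, p.1 = x := by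
      simpa [PySem.Dict.keys, List.mem_map] using hxk
    obtain ⟨p, hp, hpx⟩ := hex
    have hmem : (x, p.2) ∈ d.items := by rw [← hpx]; exact hp
    have hg : d.getD x 0 = p.2 := PySem.Dict.getD_of_mem_items d hmem hnd 0
    have hnd' : (d.items.map Prod.fst).Nodup := by
      simpa [PySem.Dict.keys] using hnd
    have hb := sum_pairsC_bump d.items x p.2 hmem hnd'
    simp only [PySem.Dict.values, PySem.Dict.items_insert_of_contains d _ hc, hg,
      List.map_map, Function.comp_def]
    simpa only [List.map_map, Function.comp_def] using hb
  · have hc' : d.contains x = false := by simpa using hc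
    have hg : d.getD x 0 = 0 := PySem.Dict.getD_of_not_contains d 0 hc'
    simp only [PySem.Dict.values, PySem.Dict.items_insert_of_not_contains d _ hc', hg,
      List.map_append, List.sum_append, List.map_map, Function.comp_def]
    simp [pairsC_one]

lemma solve_invariant (l : List Int) :
    ∀ (d : PySem.Dict Int Int) (r : Int), d.keys.Nodup →
      (l.foldl (fun st e =>
          let ds := numsum e
          (st.1.insert ds (st.1.getD ds 0 + 1), st.2 + st.1.getD ds 0)) (d, r)).2
        = r + (((l.foldl (fun d e => d.insert (numsum e) (d.getD (numsum e) 0 + 1)) d).values).map pairsC).sum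
            - ((d.values).map pairsC).sum := by
  induction l with
  | nil => intro d r hnd; simp
  | cons e l ih =>
    intro d r hnd
    simp only [List.foldl_cons]
    rw [ih (d.insert (numsum e) (d.getD (numsum e) 0 + 1)) (r + d.getD (numsum e) 0)
        (PySem.Dict.nodup_keys_insert _ _ _ hnd)]
    rw [asum_insert d (numsum e) hnd]
    ring

-- ===== VERDICT (by name: the statement is the Claim_ definition above) =====
theorem solve_spec : Claim_equal_solve := by
  intro n nums _
  unfold Spec_solve solve solve_alt
  rw [solve_invariant nums PySem.Dict.empty 0 PySem.Dict.nodup_keys_empty]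
  have hC : (fun (res v : Int) => res + PySem.Int.floordiv (v * (v - 1)) 2)
      = (fun (res v : Int) => res + pairsC v) := rfl
  rw [hC, PySem.List.foldl_add _ pairsC 0]
  have hmod : (fun (d : PySem.Dict Int Int) (e : Int) => d.modify (numsum e) 0 (· + 1))
      = (fun (d : PySem.Dict Int Int) (e : Int) => d.insert (numsum e) (d.getD (numsum e) 0 + 1)) := rfl
  rw [hmod]
  simp [PySem.Dict.values, PySem.Dict.empty]
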